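-- pv_equiv track=rewrite | github.com/don-alejandrino/aoc2023 | src/12.py | get_all_groups_of_operational_springs
-- ===== SOURCE A (Python) =====
-- def get_all_groups_of_operational_springs(springs):
--     operational_springs = []
--     group_length = 0
--     for char in springs:
--         if char == "#":
--             group_length += 1
--         elif group_length > 0:
--             operational_springs.append(group_length)
--             group_length = 0
--     if group_length != 0:
--         operational_springs.append(group_length)
--
--     return tuple(operational_springs)
-- ===== SOURCE B (Python) =====
-- def get_all_groups_of_operational_springs(springs):
--     # Run-scan: consume each maximal run of '#' at once (two pointers),
--     # instead of a per-character counter flushed on transitions.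
--     res = []
--     i, n = 0, len(springs)
--     while i < n:
--         if springs[i] == "#":
--             j = i + 1
--             while j < n and springs[j] == "#":
--                 j += 1
--             res.append(j - i)
--             i = j
--         else:
--             i += 1
--     return tuple(res)
-- ===== Notes on version B (the rewrite author's own statement) =====
-- stated objective: alternative
-- what changed: B scans the string with two pointers, consuming each maximal run of '#' in one inner loop and appending its length, instead of A's per-character counter that is flushed on every transition and once more after the loop.
import Mathlib
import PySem

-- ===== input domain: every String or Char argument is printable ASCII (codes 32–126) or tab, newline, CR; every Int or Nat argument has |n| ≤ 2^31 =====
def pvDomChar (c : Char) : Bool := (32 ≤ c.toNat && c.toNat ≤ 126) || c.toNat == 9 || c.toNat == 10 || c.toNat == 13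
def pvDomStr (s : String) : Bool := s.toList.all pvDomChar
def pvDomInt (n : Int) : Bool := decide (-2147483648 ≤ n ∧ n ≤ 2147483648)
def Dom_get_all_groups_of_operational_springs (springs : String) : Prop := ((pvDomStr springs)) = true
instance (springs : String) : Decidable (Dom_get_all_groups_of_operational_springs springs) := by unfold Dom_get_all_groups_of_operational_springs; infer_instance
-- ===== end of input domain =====

-- B replaces A's per-character counter (flushed on transitions and after the loop) by a
-- run-scan that consumes each maximal '#' run at once; alternative, same O(n) cost.

-- ===== PORT A =====
-- state = (operational_springs, group_length); final flush after the loop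
def get_all_groups_of_operational_springs (springs : String) : List Int :=
  let st := springs.toList.foldl
    (fun (st : List Int × Int) c =>
      if c = '#' then (st.1, st.2 + 1)
      else if st.2 > 0 then (st.1 ++ [st.2], 0)
      else st)
    ([], 0)
  if st.2 ≠ 0 then st.1 ++ [st.2] else st.1

-- ===== PORT B =====
-- outer while over the chars; the inner 'while j < n and springs[j] == "#"' that advances j
-- over the run is the takeWhile/dropWhile of the remaining chars (j - i = run length)
def pvRunScan : List Char → List Int
  | [] => []
  | c :: rest =>
    if c = '#' then
      (((rest.takeWhile (· = '#')).length + 1 : Nat) : Int)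
        :: pvRunScan (rest.dropWhile (· = '#'))
    else pvRunScan rest
termination_by l => l.length
decreasing_by
  · simpa using Nat.lt_succ_of_le (rest.length_dropWhile_le (· = '#'))
  · simp

def get_all_groups_of_operational_springs_alt (springs : String) : List Int :=
  pvRunScan springs.toList

-- ===== PRECONDITION & SPEC =====
def Spec_get_all_groups_of_operational_springs (springs : String) (out : List Int) : Prop := out = get_all_groups_of_operational_springs_alt springs
instance (springs : String) (out : List Int) : Decidable (Spec_get_all_groups_of_operational_springs springs out) := by unfold Spec_get_all_groups_of_operational_springs; infer_instance

-- ===== CLAIM (what is proved, stated in full; the proofs are below) =====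
def Claim_equal_get_all_groups_of_operational_springs : Prop := ∀ (springs : String), Dom_get_all_groups_of_operational_springs springs → Spec_get_all_groups_of_operational_springs springs (get_all_groups_of_operational_springs springs)

-- ===== LEMMAS AND PROOFS =====

-- invariant of A's loop, related to B's run-scan
theorem pvLoop_eq (l : List Char) : ∀ (acc : List Int) (g : Int), 0 ≤ g →
    (let st := l.foldl
        (fun (st : List Int × Int) c =>
          if c = '#' then (st.1, st.2 + 1)
          else if st.2 > 0 then (st.1 ++ [st.2], 0)
          else st)
        (acc, g)
      if st.2 ≠ 0 then st.1 ++ [st.2] else st.1) =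
    (if g = 0 then acc ++ pvRunScan l
     else acc ++ ((g + ((l.takeWhile (· = '#')).length : Int))
                    :: pvRunScan (l.dropWhile (· = '#')))) := by
  induction l with
  | nil =>
    intro acc g hg
    simp only [List.foldl_nil, List.takeWhile_nil, List.dropWhile_nil, pvRunScan]
    by_cases h : g = 0 <;> simp [h]
  | cons c rest ih =>
    intro acc g hg
    by_cases hc : c = '#'
    · simp only [List.foldl_cons, hc, if_true]
      rw [ih acc (g + 1) (by omega)]
      by_cases h : g = 0
      · subst h
        simp [pvRunScan]
        omega
      · have h1 : ¬ (g + 1 = 0) := by omega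
        simp [h, h1]
        omega
    · simp only [List.foldl_cons, if_neg hc]
      by_cases h : g = 0
      · subst h
        simp only [show ¬ ((0:Int) > 0) by omega, if_false]
        rw [ih acc 0 le_rfl]
        simp [pvRunScan, hc]
      · have hgpos : g > 0 := by omega
        simp only [if_pos hgpos]
        rw [ih (acc ++ [g]) 0 le_rfl]
        simp [pvRunScan, hc, h]

-- ===== VERDICT (by name: the statement is the Claim_ definition above) =====
theorem get_all_groups_of_operational_springs_spec : Claim_equal_get_all_groups_of_operational_springs := by
  intro springs _
  unfold Spec_get_all_groups_of_operational_springs get_all_groups_of_operational_springs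
    get_all_groups_of_operational_springs_alt
  simpa using pvLoop_eq springs.toList [] 0 le_rfl
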